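-- pv_equiv track=rewrite | github.com/DreadPirate09/Genetic-Algorithm-NEAT | carGame/collision.py | is_collision_rotated
-- ===== SOURCE A (Python) =====
-- def is_collision(rect1, rect2):
--     return not (rect1[0] + rect1[2] < rect2[0] or rect1[0] > rect2[0] + rect2[2] or
--                 rect1[1] + rect1[3] < rect2[1] or rect1[1] > rect2[1] + rect2[3])
--
-- def is_collision_rotated(rotated_rect, rect):
--     # Check collision between the rotated rectangle and the regular rectangle
--     if is_collision(rotated_rect, rect):
--         # If collision detected, check each corner of the rotated rectangle
--         # If any corner is inside the regular rectangle, return True (collision detected)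
--         for point in [(rotated_rect[0], rotated_rect[1]),
--                       (rotated_rect[0] + rotated_rect[2], rotated_rect[1]),
--                       (rotated_rect[0] + rotated_rect[2], rotated_rect[1] + rotated_rect[3]),
--                       (rotated_rect[0], rotated_rect[1] + rotated_rect[3])]:
--             if rect[0] <= point[0] <= rect[0] + rect[2] and rect[1] <= point[1] <= rect[1] + rect[3]:
--                 return True
--     return False
-- ===== SOURCE B (Python) =====
-- def is_collision_rotated(rotated_rect, rect):
--     # AABB pre-screen (same as A's is_collision, inlined)
--     if (rotated_rect[0] + rotated_rect[2] < rect[0] or rotated_rect[0] > rect[0] + rect[2] or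
--             rotated_rect[1] + rotated_rect[3] < rect[1] or rotated_rect[1] > rect[1] + rect[3]):
--         return False
--     # The four corners are the Cartesian product of x in {x0, x0+w} and y in {y0, y0+h},
--     # so "some corner inside rect" factors into two independent axis tests.
--     x_hit = (rect[0] <= rotated_rect[0] <= rect[0] + rect[2] or
--              rect[0] <= rotated_rect[0] + rotated_rect[2] <= rect[0] + rect[2])
--     y_hit = (rect[1] <= rotated_rect[1] <= rect[1] + rect[3] or
--              rect[1] <= rotated_rect[1] + rotated_rect[3] <= rect[1] + rect[3])
--     return x_hit and y_hit
-- ===== Notes on version B (the rewrite author's own statement) =====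
-- stated objective: simpler
-- what changed: Replaces the loop over the four explicit corner points with two independent axis interval tests (x_hit and y_hit), exploiting that the corners are the Cartesian product of the two x-values and two y-values; the AABB pre-screen is inlined as an early return.
import Mathlib
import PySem

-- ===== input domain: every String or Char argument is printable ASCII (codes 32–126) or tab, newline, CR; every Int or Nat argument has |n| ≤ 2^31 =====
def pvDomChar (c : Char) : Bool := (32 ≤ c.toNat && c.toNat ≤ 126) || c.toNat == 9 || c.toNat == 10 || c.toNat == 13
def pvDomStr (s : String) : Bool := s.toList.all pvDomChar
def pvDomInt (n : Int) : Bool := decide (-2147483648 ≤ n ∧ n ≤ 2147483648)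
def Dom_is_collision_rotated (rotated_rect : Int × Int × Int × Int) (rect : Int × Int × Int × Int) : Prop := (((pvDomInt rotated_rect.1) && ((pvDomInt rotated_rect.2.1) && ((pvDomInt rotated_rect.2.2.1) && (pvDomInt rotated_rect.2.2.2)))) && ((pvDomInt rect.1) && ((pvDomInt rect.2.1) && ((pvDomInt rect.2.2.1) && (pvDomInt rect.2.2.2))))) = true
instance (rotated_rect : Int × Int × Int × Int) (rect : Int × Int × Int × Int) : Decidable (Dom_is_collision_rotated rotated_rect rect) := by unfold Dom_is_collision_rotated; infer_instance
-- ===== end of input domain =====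

-- B: two independent axis interval tests instead of A's loop over the four corner points (objective: simpler).
-- ===== PORT A =====
def is_collision (rect1 rect2 : Int × Int × Int × Int) : Bool :=
  !(rect1.1 + rect1.2.2.1 < rect2.1 || rect1.1 > rect2.1 + rect2.2.2.1 ||
    rect1.2.1 + rect1.2.2.2 < rect2.2.1 || rect1.2.1 > rect2.2.1 + rect2.2.2.2)

def is_collision_rotated (rotated_rect : Int × Int × Int × Int) (rect : Int × Int × Int × Int) : Bool :=
  if is_collision rotated_rect rect then
    -- the for-loop with early 'return True' over the literal 4-corner list = List.any
    [(rotated_rect.1, rotated_rect.2.1),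
     (rotated_rect.1 + rotated_rect.2.2.1, rotated_rect.2.1),
     (rotated_rect.1 + rotated_rect.2.2.1, rotated_rect.2.1 + rotated_rect.2.2.2),
     (rotated_rect.1, rotated_rect.2.1 + rotated_rect.2.2.2)].any
      (fun point => decide (rect.1 ≤ point.1 ∧ point.1 ≤ rect.1 + rect.2.2.1 ∧
                            rect.2.1 ≤ point.2 ∧ point.2 ≤ rect.2.1 + rect.2.2.2))
  else false

-- ===== PORT B =====
def is_collision_rotated_alt (rotated_rect : Int × Int × Int × Int) (rect : Int × Int × Int × Int) : Bool :=
  if rotated_rect.1 + rotated_rect.2.2.1 < rect.1 || rotated_rect.1 > rect.1 + rect.2.2.1 ||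
     rotated_rect.2.1 + rotated_rect.2.2.2 < rect.2.1 || rotated_rect.2.1 > rect.2.1 + rect.2.2.2 then
    false
  else
    let x_hit := decide (rect.1 ≤ rotated_rect.1 ∧ rotated_rect.1 ≤ rect.1 + rect.2.2.1) ||
                 decide (rect.1 ≤ rotated_rect.1 + rotated_rect.2.2.1 ∧ rotated_rect.1 + rotated_rect.2.2.1 ≤ rect.1 + rect.2.2.1)
    let y_hit := decide (rect.2.1 ≤ rotated_rect.2.1 ∧ rotated_rect.2.1 ≤ rect.2.1 + rect.2.2.2) ||
                 decide (rect.2.1 ≤ rotated_rect.2.1 + rotated_rect.2.2.2 ∧ rotated_rect.2.1 + rotated_rect.2.2.2 ≤ rect.2.1 + rect.2.2.2)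
    x_hit && y_hit

-- ===== PRECONDITION & SPEC =====
def Spec_is_collision_rotated (rotated_rect : Int × Int × Int × Int) (rect : Int × Int × Int × Int) (out : Bool) : Prop := out = is_collision_rotated_alt rotated_rect rect
instance (rotated_rect : Int × Int × Int × Int) (rect : Int × Int × Int × Int) (out : Bool) : Decidable (Spec_is_collision_rotated rotated_rect rect out) := by unfold Spec_is_collision_rotated; infer_instance

-- ===== CLAIM (what is proved, stated in full; the proofs are below) =====
def Claim_equal_is_collision_rotated : Prop := ∀ (rotated_rect : Int × Int × Int × Int) (rect : Int × Int × Int × Int), Dom_is_collision_rotated rotated_rect rect → Spec_is_collision_rotated rotated_rect rect (is_collision_rotated rotated_rect rect)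

-- ===== LEMMAS AND PROOFS =====

-- ===== VERDICT (by name: the statement is the Claim_ definition above) =====
theorem is_collision_rotated_spec : Claim_equal_is_collision_rotated := by
  intro rr rect _
  unfold Spec_is_collision_rotated
  obtain ⟨a, b, w, h⟩ := rr
  obtain ⟨x, y, rw', rh⟩ := rect
  simp only [is_collision_rotated, is_collision_rotated_alt, is_collision, List.any]
  rw [Bool.eq_iff_iff]
  simp
  omega
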